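-- pv_equiv track=rewrite | github.com/AthosMatos/autotab | server/TabGenV2.py | calcular_peso_combinacao
-- ===== SOURCE A (Python) =====
-- def calcular_peso_combinacao(combinacao,parametros):
--     peso = 0
--     trastes = [posicao['fret'] for posicao in combinacao]
--     cordas = [posicao['string'] for posicao in combinacao]
--
--     # Proximidade das Notas (nos trastes)
--     distancia_maxima_trastes = max(trastes) - min(trastes)
--     peso += distancia_maxima_trastes * 10  # Penalidade por maior distância entre trastes
--
--     # Proximidade nas Cordas
--     cordas.sort()
--     for i in range(1, len(cordas)):
--         peso += (cordas[i] - cordas[i-1] - 1) * 5  # Penalidade por maior distância entre cordas adjacentes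
--
--     # Facilidade de Formação e Distribuição Balanceada
--     # Ajuste baseado na distribuição das notas e padrões comuns de acordes
--     peso += abs(4 - (trastes[-1] - trastes[0])) * 5  # Incentiva acordes dentro de uma extensão de 4 trastes
--
--     # Ajuste para acordes com distribuição de notas em cordas consecutivas
--     peso += (4 - len(set(cordas))) * 15  # Incentiva o uso de todas as cordas disponíveis no acorde
--
--     # Ajuste pela proximidade à casa de conforto
--     peso += sum([abs(traste - parametros['casa_conforto']) for traste in trastes])
--
--     return peso
-- ===== SOURCE B (Python) =====
-- def calcular_peso_combinacao(combinacao, parametros):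
--     # Single pass with running aggregates; no sort, no intermediate lists.
--     # The sorted adjacent-difference loop telescopes to max - min - (n - 1).
--     cc = parametros['casa_conforto']
--     first, *rest = combinacao
--     t0 = first['fret']
--     c0 = first['string']
--     min_t = max_t = last_t = t0
--     min_c = max_c = c0
--     seen = {c0}
--     conf = abs(t0 - cc)
--     n = 1
--     for pos in rest:
--         t = pos['fret']
--         c = pos['string']
--         min_t = min(min_t, t)
--         max_t = max(max_t, t)
--         last_t = t
--         min_c = min(min_c, c)
--         max_c = max(max_c, c)
--         seen.add(c)
--         conf += abs(t - cc)
--         n += 1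
--     return ((max_t - min_t) * 10
--             + (max_c - min_c - (n - 1)) * 5
--             + abs(4 - (last_t - t0)) * 5
--             + (4 - len(seen)) * 15
--             + conf)
-- ===== Notes on version B (the rewrite author's own statement) =====
-- stated objective: alternative
-- what changed: Replaces the staged passes (list comprehensions, max/min scans, sort plus adjacent-difference index loop, set()) with a single pass over combinacao maintaining running min/max/last/seen/sum accumulators, using the telescoping identity max-min-(n-1) for the sorted adjacent-difference term.
import Mathlib
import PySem

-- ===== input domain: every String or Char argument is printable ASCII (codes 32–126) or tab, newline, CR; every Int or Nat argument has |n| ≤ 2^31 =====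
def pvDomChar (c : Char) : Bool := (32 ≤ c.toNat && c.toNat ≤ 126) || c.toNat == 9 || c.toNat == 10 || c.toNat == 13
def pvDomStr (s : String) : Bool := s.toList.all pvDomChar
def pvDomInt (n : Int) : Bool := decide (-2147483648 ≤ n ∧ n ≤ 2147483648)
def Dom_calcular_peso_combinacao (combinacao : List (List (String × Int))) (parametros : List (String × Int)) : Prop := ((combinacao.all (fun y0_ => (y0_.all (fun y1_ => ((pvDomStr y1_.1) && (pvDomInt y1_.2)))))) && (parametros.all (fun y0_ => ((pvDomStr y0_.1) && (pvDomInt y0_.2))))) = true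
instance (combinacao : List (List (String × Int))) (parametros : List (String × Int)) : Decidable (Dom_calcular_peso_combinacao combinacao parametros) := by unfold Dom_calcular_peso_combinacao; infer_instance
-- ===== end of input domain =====

-- B replaces A's staged passes (comprehensions, max/min scans, sort + adjacent-difference
-- loop, set()) with one fold maintaining running aggregates; objective: alternative.


-- shared dict access: posicao[k] (first match; Pre_ guarantees the key is present)
def pvKey (p : List (String × Int)) (k : String) : Int := (List.lookup k p).getD 0

-- ===== PORT A =====
def calcular_peso_combinacao (combinacao : List (List (String × Int))) (parametros : List (String × Int)) : Int :=
  let trastes := combinacao.map (fun posicao => pvKey posicao "fret")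
  let cordas := combinacao.map (fun posicao => pvKey posicao "string")
  let peso : Int := 0
  let distancia_maxima_trastes :=
    (PySem.List.max? trastes (fun x => x)).getD 0 - (PySem.List.min? trastes (fun x => x)).getD 0
  let peso := peso + distancia_maxima_trastes * 10
  let cordasS := PySem.List.sorted cordas (fun x => x) false
  let peso := (PySem.List.pyRange 1 (cordasS.length : Int) 1).foldl
    (fun peso i =>
      peso + (PySem.List.pyGetD cordasS i 0 - PySem.List.pyGetD cordasS (i - 1) 0 - 1) * 5) peso
  let peso := peso + |(4 : Int) - (PySem.List.pyGetD trastes (-1) 0 - PySem.List.pyGetD trastes 0 0)| * 5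
  let peso := peso + (4 - ((PySem.Set.ofList cordas).length : Int)) * 15
  let peso := peso + (trastes.map (fun traste => |traste - pvKey parametros "casa_conforto"|)).sum
  peso

-- ===== PORT B =====
-- running aggregates of B's single loop: min/max/last fret, min/max string,
-- the set of strings seen, the comfort-distance sum and the count
structure PvAgg where
  minT : Int
  maxT : Int
  lastT : Int
  minC : Int
  maxC : Int
  seen : PySem.Set Int
  conf : Int
  n : Int
deriving Repr, DecidableEq

def pvStep (cc : Int) (s : PvAgg) (pos : List (String × Int)) : PvAgg :=
  let t := pvKey pos "fret"
  let c := pvKey pos "string"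
  ⟨min s.minT t, max s.maxT t, t, min s.minC c, max s.maxC c,
    PySem.Set.add s.seen c, s.conf + |t - cc|, s.n + 1⟩

def calcular_peso_combinacao_alt (combinacao : List (List (String × Int))) (parametros : List (String × Int)) : Int :=
  let cc := pvKey parametros "casa_conforto"
  match combinacao with
  | [] => 0  -- unreachable under Pre_ (Python B raises unpacking an empty list)
  | first :: rest =>
    let t0 := pvKey first "fret"
    let c0 := pvKey first "string"
    let s := rest.foldl (pvStep cc)
      ⟨t0, t0, t0, c0, c0, PySem.Set.add PySem.Set.empty c0, |t0 - cc|, 1⟩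
    (s.maxT - s.minT) * 10
      + (s.maxC - s.minC - (s.n - 1)) * 5
      + |(4 : Int) - (s.lastT - t0)| * 5
      + (4 - (s.seen.length : Int)) * 15
      + s.conf

-- ===== PRECONDITION & SPEC =====
-- Pre_ excludes exactly the inputs where A raises: empty combinacao (max of an empty
-- sequence) or a position/parametros dict missing a needed key (KeyError).
def Pre_calcular_peso_combinacao (combinacao : List (List (String × Int))) (parametros : List (String × Int)) : Prop :=
  combinacao ≠ [] ∧
  combinacao.all (fun p => (List.lookup "fret" p).isSome && (List.lookup "string" p).isSome) = true ∧
  (List.lookup "casa_conforto" parametros).isSome = true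
instance (combinacao : List (List (String × Int))) (parametros : List (String × Int)) : Decidable (Pre_calcular_peso_combinacao combinacao parametros) := by unfold Pre_calcular_peso_combinacao; infer_instance

def pvWitness_calcular_peso_combinacao : (List (List (String × Int))) × (List (String × Int)) :=
  ([[("fret", 1), ("string", 2)], [("fret", 3), ("string", 1)]], [("casa_conforto", 2)])

def Spec_calcular_peso_combinacao (combinacao : List (List (String × Int))) (parametros : List (String × Int)) (out : Int) : Prop := out = calcular_peso_combinacao_alt combinacao parametros
instance (combinacao : List (List (String × Int))) (parametros : List (String × Int)) (out : Int) : Decidable (Spec_calcular_peso_combinacao combinacao parametros out) := by unfold Spec_calcular_peso_combinacao; infer_instance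

-- ===== CLAIM (what is proved, stated in full; the proofs are below) =====
def Claim_equal_calcular_peso_combinacao : Prop := ∀ (combinacao : List (List (String × Int))) (parametros : List (String × Int)), Dom_calcular_peso_combinacao combinacao parametros → Pre_calcular_peso_combinacao combinacao parametros → Spec_calcular_peso_combinacao combinacao parametros (calcular_peso_combinacao combinacao parametros)

-- ===== LEMMAS AND PROOFS =====

-- each field of B's fold, expressed as an aggregate of the whole list
lemma pvAgg_fields (cc : Int) (l : List (List (String × Int))) (s : PvAgg) :
    (l.foldl (pvStep cc) s)
      = ⟨(l.map (fun p => pvKey p "fret")).foldl min s.minT,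
         (l.map (fun p => pvKey p "fret")).foldl max s.maxT,
         (l.map (fun p => pvKey p "fret")).getLastD s.lastT,
         (l.map (fun p => pvKey p "string")).foldl min s.minC,
         (l.map (fun p => pvKey p "string")).foldl max s.maxC,
         (l.map (fun p => pvKey p "string")).foldl PySem.Set.add s.seen,
         s.conf + ((l.map (fun p => pvKey p "fret")).map (fun t => |t - cc|)).sum,
         s.n + l.length⟩ := by
  induction l generalizing s with
  | nil => simp
  | cons p l ih =>
      simp only [List.foldl_cons, List.map_cons, ih, pvStep, List.getLastD_cons]
      cases l with
      | nil => simp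
      | cons q l => simp; exact ⟨by ring, by ring⟩

lemma pvGetD_cons_concat (x y : Int) (l : List Int) (i : Int) (h0 : 0 ≤ i) (h1 : i < ((x :: l).length : Int)) :
    PySem.List.pyGetD (x :: (l ++ [y])) i 0 = PySem.List.pyGetD (x :: l) i 0 := by
  rw [PySem.List.pyGetD_eq_getElem _ _ h0 (by simp at h1 ⊢; omega),
      PySem.List.pyGetD_eq_getElem _ _ h0 h1]
  exact List.getElem_append_left (as := x :: l) (bs := [y]) (by simp at h1 ⊢; omega)

-- A's adjacent-difference loop over a list telescopes to last - head - (len-1)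
lemma tele_loop (x : Int) (t : List Int) (acc : Int) :
    (PySem.List.pyRange 1 (((x :: t).length : Int)) 1).foldl
      (fun peso i =>
        peso + (PySem.List.pyGetD (x :: t) i 0 - PySem.List.pyGetD (x :: t) (i - 1) 0 - 1) * 5) acc
      = acc + ((x :: t).getLast (by simp) - x - ((t.length : Int))) * 5 := by
  induction t using List.reverseRecOn generalizing acc with
  | nil =>
      simp [PySem.List.pyRange_one_eq_nil]
  | append_singleton t' y ih =>
      have hlen : (((x :: (t' ++ [y])).length : Int)) = ((x :: t').length : Int) + 1 := by
        simp
      rw [hlen, PySem.List.pyRange_one_succ_right (by simp), List.foldl_append]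
      have hpre : ∀ (a : Int), ∀ i ∈ PySem.List.pyRange 1 (((x :: t').length : Int)) 1,
          (fun peso i => peso + (PySem.List.pyGetD (x :: (t' ++ [y])) i 0 - PySem.List.pyGetD (x :: (t' ++ [y])) (i - 1) 0 - 1) * 5) a i
          = (fun peso i => peso + (PySem.List.pyGetD (x :: t') i 0 - PySem.List.pyGetD (x :: t') (i - 1) 0 - 1) * 5) a i := by
        intro a i hi
        rw [PySem.List.mem_pyRange_one] at hi
        simp only [List.length_cons] at hi
        simp only []
        rw [pvGetD_cons_concat _ _ _ _ (by omega) (by simp; omega),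
            pvGetD_cons_concat _ _ _ _ (by omega) (by simp; omega)]
      rw [PySem.List.foldl_congr_mem _ _ _ acc hpre, ih]
      have hA : PySem.List.pyGetD (x :: (t' ++ [y])) (((x :: t').length : Int)) 0 = y := by
        rw [PySem.List.pyGetD_eq_getElem _ _ (by positivity) (by simp)]
        simp
      have hB : PySem.List.pyGetD (x :: (t' ++ [y])) (((x :: t').length : Int) - 1) 0
          = (x :: t').getLast (by simp) := by
        rw [pvGetD_cons_concat _ _ _ _ (by simp) (by simp),
            PySem.List.pyGetD_eq_getElem _ _ (by simp) (by simp),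
            List.getLast_eq_getElem]
        congr 1
        simp
      have hy : (x :: (t' ++ [y])).getLast (by simp) = y := List.getLast_concat (l := x :: t')
      simp only [List.foldl_cons, List.foldl_nil]
      rw [hA, hB, hy]
      simp only [List.length_append, List.length_cons, List.length_nil]
      push_cast
      ring

-- the sorted list's last element is the maximum (value of max?)
lemma max_getD_eq_getLast (c : Int) (cs : List Int) :
    (PySem.List.max? (c :: cs) (fun x => x)).getD 0
      = (PySem.List.sorted (c :: cs) (fun x => x) false).getLast
          (by simp [PySem.List.sorted_eq_nil_iff]) := by
  set s := PySem.List.sorted (c :: cs) (fun x => x) false with hs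
  have hsne : s ≠ [] := by simp [hs, PySem.List.sorted_eq_nil_iff]
  obtain ⟨m, hm⟩ : ∃ m, PySem.List.max? (c :: cs) (fun x => x) = some m := by
    cases h : PySem.List.max? (c :: cs) (fun x => x) with
    | none => exact absurd ((PySem.List.max?_eq_none_iff _ _).mp h) (by simp)
    | some m => exact ⟨m, rfl⟩
  rw [hm]; simp only [Option.getD_some]
  have hmax := PySem.List.max?_isMax hm
  have hperm : s.Perm (c :: cs) := PySem.List.sorted_perm _ _ _
  have hlmem : s.getLast hsne ∈ (c :: cs) := hperm.mem_iff.mp (List.getLast_mem hsne)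
  have hms : m ∈ s := hperm.mem_iff.mpr (PySem.List.max?_mem hm)
  obtain ⟨i, hi, hgi⟩ := List.getElem_of_mem hms
  have hlen : 0 < s.length := List.length_pos_of_ne_nil hsne
  have hlast : s.getLast hsne = s[s.length - 1] := List.getLast_eq_getElem hsne
  have h1 : m ≤ s.getLast hsne := by
    rw [hlast, ← hgi]
    exact PySem.List.sorted_id_getElem_mono (c :: cs) (by omega) (by rw [← hs]; omega)
  exact le_antisymm h1 (hmax _ hlmem)

-- the sorted list's head is the minimum (value of min?)
lemma min_getD_eq_head (c : Int) (cs : List Int) :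
    (PySem.List.min? (c :: cs) (fun x => x)).getD 0
      = (PySem.List.sorted (c :: cs) (fun x => x) false).head
          (by simp [PySem.List.sorted_eq_nil_iff]) := by
  set s := PySem.List.sorted (c :: cs) (fun x => x) false with hs
  have hsne : s ≠ [] := by simp [hs, PySem.List.sorted_eq_nil_iff]
  obtain ⟨m, hm⟩ : ∃ m, PySem.List.min? (c :: cs) (fun x => x) = some m := by
    cases h : PySem.List.min? (c :: cs) (fun x => x) with
    | none => exact absurd ((PySem.List.min?_eq_none_iff _ _).mp h) (by simp)
    | some m => exact ⟨m, rfl⟩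
  rw [hm]; simp only [Option.getD_some]
  have hmin := PySem.List.min?_isMin hm
  have hperm : s.Perm (c :: cs) := PySem.List.sorted_perm _ _ _
  have hhmem : s.head hsne ∈ (c :: cs) := hperm.mem_iff.mp (List.head_mem hsne)
  have hms : m ∈ s := hperm.mem_iff.mpr (PySem.List.min?_mem hm)
  obtain ⟨i, hi, hgi⟩ := List.getElem_of_mem hms
  have hlen : 0 < s.length := List.length_pos_of_ne_nil hsne
  have hhead : s.head hsne = s[0] := List.head_eq_getElem hsne
  have h1 : s.head hsne ≤ m := by
    rw [hhead, ← hgi]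
    exact PySem.List.sorted_id_getElem_mono (c :: cs) (by omega) (by rw [← hs]; omega)
  exact le_antisymm (hmin _ hhmem) h1

lemma pvGetLast_cons (x : Int) (l : List Int) (h : (x :: l) ≠ []) :
    (x :: l).getLast h = l.getLastD x := by
  cases l with
  | nil => simp
  | cons y t => simp [List.getLast_cons, List.getLastD_eq_getLast?, List.getLast?_eq_some_getLast]

-- ===== VERDICT (by name: the statement is the Claim_ definition above) =====
theorem calcular_peso_combinacao_spec : Claim_equal_calcular_peso_combinacao := by
  intro combinacao parametros _ hpre
  obtain ⟨hne, -, -⟩ := hpre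
  obtain ⟨p, rest, rfl⟩ := List.exists_cons_of_ne_nil hne
  unfold Spec_calcular_peso_combinacao
  simp only [calcular_peso_combinacao, calcular_peso_combinacao_alt, List.map_cons, pvAgg_fields]
  cases hs : PySem.List.sorted (pvKey p "string" :: rest.map (fun posicao => pvKey posicao "string")) (fun x => x) false with
  | nil => exact absurd ((PySem.List.sorted_eq_nil_iff _ _ _).mp hs) (by simp)
  | cons m ms =>
    have hmax := max_getD_eq_getLast (pvKey p "string") (rest.map (fun posicao => pvKey posicao "string"))
    have hmin := min_getD_eq_head (pvKey p "string") (rest.map (fun posicao => pvKey posicao "string"))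
    simp only [hs] at hmax hmin
    have hlen : (m :: ms).length = (pvKey p "string" :: rest.map (fun posicao => pvKey posicao "string")).length := by
      rw [← hs, PySem.List.length_sorted]
    simp only [List.length_cons] at hlen
    simp only [List.head_cons] at hmin
    rw [tele_loop, ← hmax, ← hmin]
    -- max/min via the running-max/min folds
    rw [PySem.List.max?_id_cons, PySem.List.min?_id_cons, PySem.List.max?_id_cons, PySem.List.min?_id_cons]
    -- trastes[-1] and trastes[0]
    rw [PySem.List.pyGetD_neg_one (xs := pvKey p "fret" :: rest.map (fun posicao => pvKey posicao "fret")) (h := by simp),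
        pvGetLast_cons, PySem.List.pyGetD_zero_cons]
    -- set(cordas) as the fold of adds
    rw [PySem.Set.ofList_eq_foldl, List.foldl_cons]
    simp only [Option.getD_some, List.sum_cons, PySem.Set.empty, PySem.Set.add]
    have hlen2 : (ms.length : Int) = ((rest.map (fun posicao => pvKey posicao "string")).length : Int) := by
      omega
    rw [hlen2]
    simp only [List.length_map]
    ring
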